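-- pv_equiv track=rewrite | github.com/Blackbird081/Controlled-Vibe-Framework-CVF | EXTENSIONS/CVF_v1.6.1_GOVERNANCE_ENGINE/ai_governance_core/policy_dsl/dsl_parser.py | parse
-- ===== SOURCE A (Python) =====
-- def parse(dsl_text):
--
--     rules = []
--     lines = dsl_text.strip().split("\n")
--
--     current_rule = {}
--
--     for line in lines:
--         line = line.strip()
--
--         if line.startswith("RULE"):
--             if current_rule:
--                 rules.append(current_rule)
--             current_rule = {"name": line.split()[1]}
--
--         elif line.startswith("WHEN"):
--             current_rule["condition"] = line[5:]
--
--         elif line.startswith("THEN"):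
--             current_rule["action"] = line.split("=")[1].strip().strip('"')
--
--     if current_rule:
--         rules.append(current_rule)
--
--     return rules
-- ===== SOURCE B (Python) =====
-- def parse(dsl_text):
--     lines = [ln.strip() for ln in dsl_text.strip().split("\n")]
--     # phase 1: split into segments, a new segment starts at each RULE line
--     segments = []
--     seg = []
--     for ln in lines:
--         if ln.startswith("RULE"):
--             segments.append(seg)
--             seg = [ln]
--         else:
--             seg.append(ln)
--     segments.append(seg)
--     # phase 2: each segment becomes one rule dict; drop empty ones (blank leading segment)
--     rules = []
--     for seg in segments:
--         d = {}
--         for ln in seg: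
--             if ln.startswith("RULE"):
--                 d["name"] = ln.split()[1]
--             elif ln.startswith("WHEN"):
--                 d["condition"] = ln[5:]
--             elif ln.startswith("THEN"):
--                 d["action"] = ln.split("=")[1].strip().strip('"')
--         if d:
--             rules.append(d)
--     return rules
-- ===== Notes on version B (the rewrite author's own statement) =====
-- stated objective: alternative
-- what changed: Replaces A's single stateful loop carrying a current-rule dict across iterations with a two-phase decomposition: first split the stripped lines into segments starting at each RULE line, then map each segment independently to its dict and drop empty ones.
import Mathlib
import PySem

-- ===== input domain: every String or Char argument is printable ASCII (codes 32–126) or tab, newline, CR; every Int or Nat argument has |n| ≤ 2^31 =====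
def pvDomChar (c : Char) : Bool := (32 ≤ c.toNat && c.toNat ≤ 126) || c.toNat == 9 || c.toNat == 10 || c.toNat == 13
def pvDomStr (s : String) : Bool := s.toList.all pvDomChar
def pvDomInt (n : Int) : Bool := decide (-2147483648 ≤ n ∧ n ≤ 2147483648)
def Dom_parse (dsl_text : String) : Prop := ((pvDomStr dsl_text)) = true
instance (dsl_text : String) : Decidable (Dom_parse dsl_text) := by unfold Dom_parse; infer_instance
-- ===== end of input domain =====

-- B restructures A's single stateful loop into segmentation-at-RULE-lines plus an
-- independent per-segment dict build (objective: alternative decomposition, same cost).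

-- ===== PORT A =====
-- one loop iteration of A on an ALREADY-STRIPPED line (parse feeds it lines.map strip,
-- the same values A computes by stripping at the top of each iteration)
def parseStep (st : List (PySem.Dict String String) × PySem.Dict String String)
    (line : String) : List (PySem.Dict String String) × PySem.Dict String String :=
  if PySem.Str.startswith line "RULE" then
    ((if st.2.items.isEmpty then st.1 else st.1 ++ [st.2]),
     -- line.split()[1]; pyGet? is none on a bare "RULE" line (IndexError, outside Pre_)
     PySem.Dict.empty.insert "name" ((PySem.List.pyGet? (PySem.Str.split₀ line) 1).getD ""))
  else if PySem.Str.startswith line "WHEN" then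
    (st.1, st.2.insert "condition" (PySem.Str.slice line (some 5) none))
  else if PySem.Str.startswith line "THEN" then
    -- line.split("=")[1].strip().strip('"'); pyGet? none on a '='-less line (outside Pre_)
    (st.1, st.2.insert "action"
      (PySem.Str.stripChars
        (PySem.Str.strip ((PySem.List.pyGet? ((PySem.Str.split? line "=").getD []) 1).getD "")) "\""))
  else st

def parse (dsl_text : String) : List (List (String × String)) :=
  let lines := (PySem.Str.split? (PySem.Str.strip dsl_text) "\n").getD []
  let st := (lines.map PySem.Str.strip).foldl parseStep ([], PySem.Dict.empty)
  let rules := if st.2.items.isEmpty then st.1 else st.1 ++ [st.2]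
  rules.map PySem.Dict.items

-- ===== PORT B =====
-- phase 1 of Source B: split the stripped lines into segments, a new segment per RULE line
def segStep (st : List (List String) × List String) (ln : String) :
    List (List String) × List String :=
  if PySem.Str.startswith ln "RULE" then (st.1 ++ [st.2], [ln]) else (st.1, st.2 ++ [ln])

-- the inner per-line dict update of Source B's phase 2
def lineToDict (d : PySem.Dict String String) (ln : String) : PySem.Dict String String :=
  if PySem.Str.startswith ln "RULE" then
    d.insert "name" ((PySem.List.pyGet? (PySem.Str.split₀ ln) 1).getD "")
  else if PySem.Str.startswith ln "WHEN" then
    d.insert "condition" (PySem.Str.slice ln (some 5) none)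
  else if PySem.Str.startswith ln "THEN" then
    d.insert "action"
      (PySem.Str.stripChars
        (PySem.Str.strip ((PySem.List.pyGet? ((PySem.Str.split? ln "=").getD []) 1).getD "")) "\"")
  else d

def segToDict (seg : List String) : PySem.Dict String String :=
  seg.foldl lineToDict PySem.Dict.empty

def parse_alt (dsl_text : String) : List (List (String × String)) :=
  let lines := ((PySem.Str.split? (PySem.Str.strip dsl_text) "\n").getD []).map PySem.Str.strip
  let st := lines.foldl segStep ([], [])
  let segments := st.1 ++ [st.2]
  ((segments.map segToDict).filter (fun d => !d.items.isEmpty)).map PySem.Dict.items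

-- ===== PRECONDITION & SPEC =====
-- Pre_ excludes exactly the inputs on which Python A raises IndexError: a stripped
-- line starting with "RULE" but with no second whitespace-separated token, or a
-- stripped line starting with "THEN" (and not "RULE") containing no '='.
def Pre_parse (dsl_text : String) : Prop :=
  ∀ ln0 ∈ (PySem.Str.split? (PySem.Str.strip dsl_text) "\n").getD [],
    (PySem.Str.startswith (PySem.Str.strip ln0) "RULE" = true →
      2 ≤ (PySem.Str.split₀ (PySem.Str.strip ln0)).length) ∧
    (PySem.Str.startswith (PySem.Str.strip ln0) "RULE" = false →
      PySem.Str.startswith (PySem.Str.strip ln0) "THEN" = true →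
      2 ≤ ((PySem.Str.split? (PySem.Str.strip ln0) "=").getD []).length)
instance (dsl_text : String) : Decidable (Pre_parse dsl_text) := by unfold Pre_parse; infer_instance

def pvWitness_parse : String := "RULE r1\nWHEN x > 0\nTHEN action = \"go\""

def Spec_parse (dsl_text : String) (out : List (List (String × String))) : Prop := out = parse_alt dsl_text
instance (dsl_text : String) (out : List (List (String × String))) : Decidable (Spec_parse dsl_text out) := by unfold Spec_parse; infer_instance

-- ===== CLAIM (what is proved, stated in full; the proofs are below) =====
def Claim_equal_parse : Prop := ∀ (dsl_text : String), Dom_parse dsl_text → Pre_parse dsl_text → Spec_parse dsl_text (parse dsl_text)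

-- ===== LEMMAS AND PROOFS =====

-- flush of A's final state
def flushA (st : List (PySem.Dict String String) × PySem.Dict String String) :
    List (PySem.Dict String String) :=
  if st.2.items.isEmpty then st.1 else st.1 ++ [st.2]

-- B's phase 2 on a list of segments (before the final .map items)
def procSegs (ss : List (List String)) : List (PySem.Dict String String) :=
  (ss.map segToDict).filter (fun d => !d.items.isEmpty)

theorem parseStep_rule (rules : List (PySem.Dict String String))
    (cur : PySem.Dict String String) (l : String)
    (hR : PySem.Str.startswith l "RULE" = true) :
    parseStep (rules, cur) l
      = ((if cur.items.isEmpty then rules else rules ++ [cur]), segToDict [l]) := by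
  unfold parseStep segToDict
  rw [List.foldl_cons, List.foldl_nil]
  unfold lineToDict
  rw [if_pos hR, if_pos hR]

theorem parseStep_not_rule (rules : List (PySem.Dict String String))
    (cur : PySem.Dict String String) (l : String)
    (hR : ¬ PySem.Str.startswith l "RULE" = true) :
    parseStep (rules, cur) l = (rules, lineToDict cur l) := by
  unfold parseStep lineToDict
  rw [if_neg hR, if_neg hR]
  split_ifs <;> rfl

theorem segStep_rule (segs : List (List String)) (seg : List String) (l : String)
    (hR : PySem.Str.startswith l "RULE" = true) :
    segStep (segs, seg) l = (segs ++ [seg], [l]) := by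
  unfold segStep; rw [if_pos hR]

theorem segStep_not_rule (segs : List (List String)) (seg : List String) (l : String)
    (hR : ¬ PySem.Str.startswith l "RULE" = true) :
    segStep (segs, seg) l = (segs, seg ++ [l]) := by
  unfold segStep; rw [if_neg hR]

theorem segToDict_append (seg : List String) (l : String) :
    segToDict (seg ++ [l]) = lineToDict (segToDict seg) l := by
  simp [segToDict]

theorem procSegs_nil : procSegs [] = [] := rfl

theorem procSegs_cons (s : List String) (rest : List (List String)) :
    procSegs (s :: rest)
      = (if (segToDict s).items.isEmpty then [] else [segToDict s]) ++ procSegs rest := by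
  unfold procSegs
  rw [List.map_cons, List.filter_cons]
  by_cases h : (segToDict s).items.isEmpty <;> simp [h]

-- the segments accumulator only ever grows on the right
theorem segStep_shift (L : List String) (segs : List (List String)) (seg : List String) :
    L.foldl segStep (segs, seg) =
      (segs ++ (L.foldl segStep ([], seg)).1, (L.foldl segStep ([], seg)).2) := by
  induction L generalizing segs seg with
  | nil => simp
  | cons l L ih =>
    by_cases h : PySem.Str.startswith l "RULE" = true
    · rw [List.foldl_cons, List.foldl_cons, segStep_rule _ _ _ h, segStep_rule _ _ _ h,
        List.nil_append, ih (segs ++ [seg]) [l], ih [seg] [l]]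
      simp [List.append_assoc]
    · rw [List.foldl_cons, List.foldl_cons, segStep_not_rule _ _ _ h, segStep_not_rule _ _ _ h]
      exact ih segs (seg ++ [l])

-- main invariant: A's loop from (rules, segToDict seg) equals rules ++ B's phase-2
-- output of the pending segment seg followed by the segments cut from the rest
theorem main_inv (L : List String) (rules : List (PySem.Dict String String))
    (seg : List String) :
    flushA (L.foldl parseStep (rules, segToDict seg)) =
      rules ++ procSegs ((L.foldl segStep ([], seg)).1 ++ [(L.foldl segStep ([], seg)).2]) := by
  induction L generalizing rules seg with
  | nil =>
    rw [List.foldl_nil, List.foldl_nil]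
    unfold flushA
    rw [List.nil_append, procSegs_cons, procSegs_nil]
    by_cases h : (segToDict seg).items.isEmpty <;> simp [h]
  | cons l L ih =>
    rw [List.foldl_cons, List.foldl_cons]
    by_cases hR : PySem.Str.startswith l "RULE" = true
    · rw [parseStep_rule _ _ _ hR, segStep_rule _ _ _ hR, List.nil_append,
        ih _ [l], segStep_shift L [seg] [l], List.append_assoc]
      rw [show [seg] ++ ((L.foldl segStep ([], [l])).1 ++ [(L.foldl segStep ([], [l])).2])
            = seg :: ((L.foldl segStep ([], [l])).1 ++ [(L.foldl segStep ([], [l])).2]) from rfl]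
      rw [procSegs_cons]
      by_cases h : (segToDict seg).items.isEmpty <;> simp [h]
    · rw [parseStep_not_rule _ _ _ hR, segStep_not_rule _ _ _ hR, ← segToDict_append]
      exact ih rules (seg ++ [l])

-- ===== VERDICT (by name: the statement is the Claim_ definition above) =====
theorem parse_spec : Claim_equal_parse := by
  intro t _ _
  unfold Spec_parse
  simp only [parse, parse_alt]
  have h := main_inv (((PySem.Str.split? (PySem.Str.strip t) "\n").getD []).map PySem.Str.strip) [] []
  unfold flushA procSegs at h
  rw [List.nil_append] at h
  rw [show segToDict [] = PySem.Dict.empty from rfl] at h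
  exact congrArg (List.map PySem.Dict.items) h
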